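-- pv_equiv track=rewrite | github.com/miliar/Code_Jam_Webscraper | Solutions_in_python/Problem_53/SnapperChain_2.py | snapperChain
-- ===== SOURCE A (Python) =====
-- def snapperChain(nSnappers, kTimes):
-- 	if(kTimes <= 0):
-- 		return 0
-- 	if(nSnappers <= 0):
-- 		return 0
--
-- 	m = nSnappers
--
-- 	total = 1
-- 	while(m>0):
-- 		total *= 2
-- 		m = m -1
--
-- 	snapperCount = total -1
-- 	if((kTimes-snapperCount)%(snapperCount+1) == 0):
-- 		return 1
-- 	else:
-- 		return 0
-- ===== SOURCE B (Python) =====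
-- def snapperChain(nSnappers, kTimes):
--     if kTimes <= 0 or nSnappers <= 0:
--         return 0
--     k = kTimes
--     for _ in range(nSnappers):
--         if k % 2 == 0:
--             return 0
--         k //= 2
--     return 1
-- ===== Notes on version B (the rewrite author's own statement) =====
-- stated objective: alternative
-- what changed: Instead of building 2^nSnappers with a multiplication loop and then testing one big modulus, B walks the low bits of kTimes directly: it checks that each of the nSnappers lowest bits of kTimes is 1, stopping early at the first 0 bit, so no bignum power is ever formed.
import Mathlib
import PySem

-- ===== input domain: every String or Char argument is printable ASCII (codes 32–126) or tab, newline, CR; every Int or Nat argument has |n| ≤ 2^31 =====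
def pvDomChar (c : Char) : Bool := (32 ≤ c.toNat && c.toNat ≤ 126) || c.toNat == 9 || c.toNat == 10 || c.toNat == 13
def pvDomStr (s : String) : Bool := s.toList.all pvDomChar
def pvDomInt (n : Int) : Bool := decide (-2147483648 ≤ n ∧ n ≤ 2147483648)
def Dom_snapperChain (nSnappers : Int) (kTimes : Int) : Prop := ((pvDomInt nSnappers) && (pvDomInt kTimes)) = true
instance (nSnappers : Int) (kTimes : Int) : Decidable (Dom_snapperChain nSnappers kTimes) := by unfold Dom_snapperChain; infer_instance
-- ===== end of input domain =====

-- B replaces A's power-building loop + one big modulus by a direct scan of the low bits of kTimes (alternative decomposition; no bignum power is built).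

-- ===== PORT A =====
-- 'while m > 0: total *= 2; m -= 1'
def snapperChainPow (m : Int) (total : Int) : Int :=
  if 0 < m then snapperChainPow (m - 1) (total * 2) else total
termination_by m.toNat
decreasing_by omega

def snapperChain (nSnappers : Int) (kTimes : Int) : Int :=
  if kTimes ≤ 0 then 0
  else if nSnappers ≤ 0 then 0
  else
    let total := snapperChainPow nSnappers 1
    let snapperCount := total - 1
    if PySem.Int.mod (kTimes - snapperCount) (snapperCount + 1) = 0 then 1 else 0

-- ===== PORT B =====
-- 'for _ in range(nSnappers): if k % 2 == 0: return 0; k //= 2' then 'return 1'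
def snapperChainBits (n : Nat) (k : Int) : Int :=
  match n with
  | 0 => 1
  | n + 1 => if PySem.Int.mod k 2 = 0 then 0 else snapperChainBits n (PySem.Int.floordiv k 2)

def snapperChain_alt (nSnappers : Int) (kTimes : Int) : Int :=
  if kTimes ≤ 0 ∨ nSnappers ≤ 0 then 0
  else snapperChainBits nSnappers.toNat kTimes

-- ===== PRECONDITION & SPEC =====
def Spec_snapperChain (nSnappers : Int) (kTimes : Int) (out : Int) : Prop := out = snapperChain_alt nSnappers kTimes
instance (nSnappers : Int) (kTimes : Int) (out : Int) : Decidable (Spec_snapperChain nSnappers kTimes out) := by unfold Spec_snapperChain; infer_instance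

-- ===== CLAIM (what is proved, stated in full; the proofs are below) =====
def Claim_equal_snapperChain : Prop := ∀ (nSnappers : Int) (kTimes : Int), Dom_snapperChain nSnappers kTimes → Spec_snapperChain nSnappers kTimes (snapperChain nSnappers kTimes)

-- ===== LEMMAS AND PROOFS =====

theorem snapperChainPow_eq (m : Int) : ∀ total : Int, snapperChainPow m total = total * 2 ^ m.toNat := by
  induction m using Int.induction_on with
  | zero => intro t; rw [snapperChainPow]; simp
  | succ n ih =>
      intro t
      rw [snapperChainPow]
      have h : (0:Int) < (n:Int) + 1 := by omega
      rw [if_pos h]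
      have : ((n:Int) + 1 - 1) = (n:Int) := by ring
      rw [this, ih]
      have ht : ((n:Int) + 1).toNat = n + 1 := by omega
      have hnn : ((n:Int)).toNat = n := Int.toNat_natCast n
      rw [ht, hnn]
      ring
  | pred n _ =>
      intro t
      rw [snapperChainPow]
      have h : ¬ (0:Int) < (-(n:Int) - 1) := by omega
      rw [if_neg h]
      have : (-(n:Int) - 1).toNat = 0 := by omega
      rw [this]
      ring

theorem snapperChainBits_eq (n : Nat) : ∀ k : Int,
    snapperChainBits n k = if (k + 1) % (2 ^ n : Int) = 0 then 1 else 0 := by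
  induction n with
  | zero => intro k; simp [snapperChainBits]
  | succ n ih =>
      intro k
      rw [snapperChainBits]
      have hmod : PySem.Int.mod k 2 = k % 2 := PySem.Int.mod_eq_emod_of_pos (by norm_num)
      have hdiv : PySem.Int.floordiv k 2 = k / 2 := PySem.Int.floordiv_eq_ediv_of_pos (by norm_num)
      rw [hmod, hdiv]
      have h2 : k % 2 = 0 ∨ k % 2 = 1 := Int.emod_two_eq_zero_or_one k
      rcases h2 with h | h
      · rw [if_pos h]
        have hdvd : ¬ ((2:Int) ^ (n+1) ∣ k + 1) := by
          intro hd
          have h2d : (2:Int) ∣ k + 1 := dvd_trans (dvd_pow_self 2 (Nat.succ_ne_zero n)) hd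
          omega
        rw [if_neg (fun hc => hdvd (Int.dvd_of_emod_eq_zero hc))]
      · rw [if_neg (by omega), ih]
        have hk : k = 2 * (k / 2) + 1 := by omega
        have key : ((k / 2 + 1) % (2 ^ n : Int) = 0) ↔ ((k + 1) % (2 ^ (n+1) : Int) = 0) := by
          constructor
          · intro h0
            have hd : (2:Int) ^ n ∣ k / 2 + 1 := Int.dvd_of_emod_eq_zero h0
            have : (2:Int) ^ (n+1) ∣ k + 1 := by
              rw [hk]
              have : 2 * (k / 2) + 1 + 1 = 2 * (k / 2 + 1) := by ring
              rw [this, pow_succ, mul_comm ((2:Int)^n) 2]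
              exact mul_dvd_mul_left 2 hd
            exact Int.emod_eq_zero_of_dvd this
          · intro h0
            have hd : (2:Int) ^ (n+1) ∣ k + 1 := Int.dvd_of_emod_eq_zero h0
            have : (2:Int) ^ n ∣ k / 2 + 1 := by
              rcases hd with ⟨c, hc⟩
              refine ⟨c, ?_⟩
              have : k + 1 = 2 * (2 ^ n * c) := by rw [hc]; ring
              omega
            exact Int.emod_eq_zero_of_dvd this
        by_cases hc : (k / 2 + 1) % (2 ^ n : Int) = 0
        · rw [if_pos hc, if_pos (key.mp hc)]
        · rw [if_neg hc, if_neg (fun hx => hc (key.mpr hx))]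

-- ===== VERDICT (by name: the statement is the Claim_ definition above) =====
theorem snapperChain_spec : Claim_equal_snapperChain := by
  intro n k _
  unfold Spec_snapperChain snapperChain snapperChain_alt
  by_cases hk : k ≤ 0
  · simp [hk]
  · by_cases hn : n ≤ 0
    · simp [hk, hn]
    · rw [if_neg hk, if_neg hn, if_neg (show ¬(k ≤ 0 ∨ n ≤ 0) by tauto), snapperChainPow_eq, snapperChainBits_eq]
      have h1 : (1:Int) * 2 ^ n.toNat - 1 + 1 = 2 ^ n.toNat := by ring
      have hpos : (0:Int) < 2 ^ n.toNat := by positivity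
      have hmod : PySem.Int.mod (k - (1 * 2 ^ n.toNat - 1)) (1 * 2 ^ n.toNat - 1 + 1)
          = (k - (2 ^ n.toNat - 1)) % (2 ^ n.toNat : Int) := by
        rw [h1, PySem.Int.mod_eq_emod_of_pos hpos]; ring_nf
      show (if PySem.Int.mod (k - (1 * 2 ^ n.toNat - 1)) (1 * 2 ^ n.toNat - 1 + 1) = 0 then (1:Int) else 0)
          = if (k + 1) % (2 ^ n.toNat : Int) = 0 then 1 else 0
      rw [hmod]
      have hsub : (k - (2 ^ n.toNat - 1)) % (2 ^ n.toNat : Int) = (k + 1) % (2 ^ n.toNat : Int) := by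
        have : k - ((2:Int) ^ n.toNat - 1) = (k + 1) - 2 ^ n.toNat := by ring
        rw [this, Int.sub_emod_right]
      rw [hsub]
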